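-- pv_equiv track=rewrite | github.com/PiShrestha/adventofcode | day2.py | is_invalid
-- ===== SOURCE A (Python) =====
-- def find_factors(number):
--     factors = []
--     for i in range(1, number + 1):
--         if number % i == 0:
--             factors.append(i)
--     return factors
--
-- def is_invalid(num: int) -> bool:
--     num_in_str = str(num)
--     length = len(num_in_str)
--     factors = find_factors(length)
--
--     factors.remove(length)
--
--     for factor in factors:
--         i = factor
--         j = factor + factor
--         while j <= length:
--             if num_in_str[i - factor: i] != num_in_str[i: j]:
--                 break
--             i = j
--             j += factor
--
--         if i == length:
--             return True
--
--     return False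
-- ===== SOURCE B (Python) =====
-- def is_invalid(num: int) -> bool:
--     s = str(num)
--     return s in (s + s)[1:-1]
-- ===== Notes on version B (the rewrite author's own statement) =====
-- stated objective: simpler
-- what changed: Replaced the divisor enumeration (find_factors) and the nested block-comparison while-loop with the one-line repeated-substring rotation test s in (s+s)[1:-1].
import Mathlib
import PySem

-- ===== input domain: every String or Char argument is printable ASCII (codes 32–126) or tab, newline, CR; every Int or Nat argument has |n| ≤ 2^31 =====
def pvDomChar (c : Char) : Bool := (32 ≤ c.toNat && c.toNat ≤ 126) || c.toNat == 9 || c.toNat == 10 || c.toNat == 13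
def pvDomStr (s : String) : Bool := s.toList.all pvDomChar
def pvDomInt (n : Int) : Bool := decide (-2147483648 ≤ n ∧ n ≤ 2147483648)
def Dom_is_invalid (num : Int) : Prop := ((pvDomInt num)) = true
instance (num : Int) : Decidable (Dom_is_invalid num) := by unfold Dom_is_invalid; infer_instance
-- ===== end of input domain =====

-- B replaces A's divisor enumeration and nested block-comparison loop by the one-line
-- repeated-substring rotation test  s in (s+s)[1:-1]  (simpler; same return value everywhere).

-- ===== PORT A =====
def find_factors (number : Int) : List Int :=
  (PySem.List.pyRange 1 (number + 1)).foldl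
    (fun factors i => if PySem.Int.mod number i == 0 then factors ++ [i] else factors) []

-- inner 'while j <= length' loop of A; fuel only makes the recursion total (the call site passes enough)
def pvScan (s : List Char) (length factor : Int) : Nat → Int → Int → Int
  | 0, i, _ => i
  | fuel + 1, i, j =>
    if j ≤ length then
      if PySem.List.slice s (some (i - factor)) (some i) ≠ PySem.List.slice s (some i) (some j)
      then i
      else pvScan s length factor fuel j (j + factor)
    else i

def is_invalid (num : Int) : Bool :=
  let num_in_str := PySem.Int.toChars num
  let length : Int := num_in_str.length
  match PySem.List.remove? (find_factors length) length with
  | none => false  -- unreachable: length ∣ length, so length is in the factor list (Python would raise ValueError)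
  | some factors =>
    factors.any (fun factor =>
      pvScan num_in_str length factor (num_in_str.length + 1) factor (factor + factor) == length)

-- ===== PORT B =====
def is_invalid_alt (num : Int) : Bool :=
  let s := PySem.Int.toChars num
  PySem.Chars.isIn s (PySem.List.slice (s ++ s) (some 1) (some (-1)))

-- ===== PRECONDITION & SPEC =====
def Spec_is_invalid (num : Int) (out : Bool) : Prop := out = is_invalid_alt num
instance (num : Int) (out : Bool) : Decidable (Spec_is_invalid num out) := by unfold Spec_is_invalid; infer_instance

-- ===== CLAIM (what is proved, stated in full; the proofs are below) =====
def Claim_equal_is_invalid : Prop := ∀ (num : Int), Dom_is_invalid num → Spec_is_invalid num (is_invalid num)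

-- ===== LEMMAS AND PROOFS =====

-- cyclic period k: s[i] = s[(i+k) mod n] for all i < n
def pvCPer (s : List Char) (k : Nat) : Prop := ∀ i, i < s.length → s[i]? = s[(i + k) % s.length]?
-- linear period f: s[i] = s[i+f] whenever both indices are in range
def pvLPer (s : List Char) (f : Nat) : Prop := ∀ i, i + f < s.length → s[i]? = s[i + f]?

theorem pv_toChars_ne_nil (num : Int) : PySem.Int.toChars num ≠ [] := by
  unfold PySem.Int.toChars
  split
  · simp
  · exact List.ne_nil_of_length_pos Nat.length_toDigits_pos

theorem pv_pyRange_eq (n : Nat) :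
    PySem.List.pyRange 1 ((n : Int) + 1) = (List.range' 1 n).map (Nat.cast) := by
  induction n with
  | zero => decide
  | succ m ih =>
    have h1 : ((m + 1 : Nat) : Int) + 1 = ((m : Int) + 1) + 1 := by push_cast; ring
    rw [h1, PySem.List.pyRange_one_succ_right (by omega), ih, List.range'_concat,
      List.map_append]
    simp
    omega

theorem pv_find_factors_eq (n : Nat) :
    find_factors (n : Int) = ((List.range' 1 n).filter (fun d => decide (d ∣ n))).map (Nat.cast) := by
  unfold find_factors
  rw [PySem.List.foldl_append_if_eq_filter (fun i => PySem.Int.mod (n : Int) i == 0)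
      (PySem.List.pyRange 1 ((n : Int) + 1)) []]
  rw [List.nil_append, pv_pyRange_eq, List.filter_map]
  congr 1
  apply List.filter_congr
  intro d _
  simp only [Function.comp_apply]
  rw [Bool.eq_iff_iff]
  simp [Int.natCast_dvd_natCast]

theorem pv_remove_factors (n : Nat) (hn : 0 < n) :
    PySem.List.remove? (find_factors (n : Int)) (n : Int) =
      some ((((List.range' 1 n).filter (fun d => decide (d ∣ n))).map (Nat.cast : Nat → Int)).erase (n : Int)) := by
  rw [pv_find_factors_eq]
  set L := (((List.range' 1 n).filter (fun d => decide (d ∣ n))).map (Nat.cast : Nat → Int)) with hL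
  have hmem : (n : Int) ∈ L := by
    rw [hL]
    refine List.mem_map.mpr ⟨n, List.mem_filter.mpr ⟨?_, by simp⟩, rfl⟩
    rw [List.mem_range']
    exact ⟨n - 1, by omega, by omega⟩
  have hsome : (List.idxOf? (n : Int) L).isSome = true := List.isSome_idxOf?.mpr hmem
  unfold PySem.List.remove?
  cases h : List.idxOf? (n : Int) L with
  | none => rw [h] at hsome; simp at hsome
  | some k =>
    simp only [Option.map_some]
    rw [List.erase_eq_eraseIdx L, h]

theorem pv_mem_erased (n : Nat) (x : Int) :
    x ∈ ((((List.range' 1 n).filter (fun d => decide (d ∣ n))).map (Nat.cast : Nat → Int)).erase (n : Int)) ↔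
      ∃ f : Nat, x = (f : Int) ∧ 0 < f ∧ f < n ∧ f ∣ n := by
  have hnody : (((List.range' 1 n).filter (fun d => decide (d ∣ n))).map (Nat.cast : Nat → Int)).Nodup :=
    List.Nodup.map (fun a b => by exact_mod_cast id)
      (List.Nodup.filter _ (List.nodup_range' 1))
  rw [List.Nodup.mem_erase_iff hnody]
  constructor
  · rintro ⟨hne, hmem⟩
    obtain ⟨d, hd, rfl⟩ := List.mem_map.mp hmem
    obtain ⟨hdr, hdd⟩ := List.mem_filter.mp hd
    obtain ⟨i, hi, rfl⟩ := List.mem_range'.mp hdr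
    refine ⟨1 + 1 * i, rfl, by omega, ?_, by simpa using hdd⟩
    have : 1 + 1 * i ≠ n := by intro h; exact hne (by exact_mod_cast congrArg (Nat.cast : Nat → Int) h)
    have hle : 1 + 1 * i ≤ n := Nat.le_of_dvd (by omega) (by simpa using hdd)
    omega
  · rintro ⟨f, rfl, hf0, hfn, hfd⟩
    refine ⟨by exact_mod_cast Nat.ne_of_lt hfn, List.mem_map.mpr ⟨f, List.mem_filter.mpr ⟨?_, by simp [hfd]⟩, rfl⟩⟩
    rw [List.mem_range']
    exact ⟨f - 1, by omega, by omega⟩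

theorem pv_scan_spec (s : List Char) (f : Nat) (hf : 0 < f) (hd : f ∣ s.length) :
    ∀ fuel k : Nat, 0 < k → k * f ≤ s.length → s.length < (fuel + k) * f →
    ((pvScan s (s.length : Int) (f : Int) fuel ((k * f : Nat) : Int) (((k + 1) * f : Nat) : Int) = (s.length : Int)) ↔
      ∀ m, k ≤ m → (m + 1) * f ≤ s.length → (s.drop ((m - 1) * f)).take f = (s.drop (m * f)).take f) := by
  intro fuel
  induction fuel with
  | zero =>
    intro k hk hkn hfuel
    rw [Nat.zero_add] at hfuel
    exact absurd hfuel (not_lt.mpr hkn)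
  | succ fuel ih =>
    intro k hk hkn hfuel
    simp only [pvScan]
    by_cases hg : (k + 1) * f ≤ s.length
    · rw [if_pos (by exact_mod_cast hg)]
      have e1 : ((k * f : Nat) : Int) - (f : Int) = (((k - 1) * f : Nat) : Int) := by
        rw [Nat.sub_one_mul, Nat.cast_sub (Nat.le_mul_of_pos_left f hk)]
      have e2 : (k * f) - (k - 1) * f = f := by
        rw [Nat.sub_one_mul]
        have := Nat.le_mul_of_pos_left f hk
        omega
      have e3 : (k + 1) * f - k * f = f := by rw [Nat.succ_mul]; omega
      rw [e1, PySem.List.slice_natCast, PySem.List.slice_natCast, e2, e3]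
      by_cases heq : (s.drop ((k - 1) * f)).take f = (s.drop (k * f)).take f
      · rw [if_neg (by simpa using heq)]
        have e5 : (((k + 1) * f : Nat) : Int) + (f : Int) = (((k + 1 + 1) * f : Nat) : Int) := by
          push_cast [Nat.succ_mul]; ring
        rw [e5]
        have hfuel' : s.length < (fuel + (k + 1)) * f := by
          have : fuel + 1 + k = fuel + (k + 1) := by omega
          rwa [this] at hfuel
        rw [ih (k + 1) (by omega) hg hfuel']
        constructor
        · intro h m hm hm2
          rcases Nat.eq_or_lt_of_le hm with rfl | hlt
          · exact heq
          · exact h m hlt hm2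
        · intro h m hm hm2
          exact h m (by omega) hm2
      · rw [if_pos (by simpa using heq)]
        have hlt : k * f < s.length := by
          have : (k + 1) * f = k * f + f := Nat.succ_mul k f
          omega
        constructor
        · intro h
          exact absurd (by exact_mod_cast h) (Nat.ne_of_lt hlt)
        · intro h
          exact absurd (h k le_rfl hg) heq
    · rw [if_neg (by exact_mod_cast hg)]
      have hsub : f ∣ (s.length - k * f) := Nat.dvd_sub hd (dvd_mul_left f k)
      have hlt : s.length - k * f < f := by
        rw [Nat.succ_mul] at hg
        omega
      have heqn : k * f = s.length := by
        have := Nat.eq_zero_of_dvd_of_lt hsub hlt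
        omega
      constructor
      · intro _ m hm hm2
        exfalso
        have : (k + 1) * f ≤ (m + 1) * f :=
          Nat.mul_le_mul_right f (by omega)
        rw [Nat.succ_mul] at this
        omega
      · intro _
        exact_mod_cast congrArg (Nat.cast : Nat → Int) heqn

theorem pv_blocks_iff_lper (s : List Char) (f : Nat) (hf : 0 < f) (hd : f ∣ s.length) :
    (∀ m, 1 ≤ m → (m + 1) * f ≤ s.length → (s.drop ((m - 1) * f)).take f = (s.drop (m * f)).take f) ↔
      pvLPer s f := by
  constructor
  · intro h i hif
    obtain ⟨q, hq⟩ := hd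
    obtain ⟨u, t, hmod, hdm⟩ : ∃ u t, t < f ∧ f * u + t = i :=
      ⟨i / f, i % f, Nat.mod_lt i hf, Nat.div_add_mod i f⟩
    have huq : u + 2 ≤ q := by
      by_contra hc
      rw [not_le] at hc
      have h1 : f * (q - 1) ≤ f * u := Nat.mul_le_mul_left f (by omega)
      have h2 : f * q ≤ f * (q - 1) + f := by
        rw [Nat.mul_sub, Nat.mul_one]
        omega
      omega
    set m := u + 1 with hm
    have hm2 : (m + 1) * f ≤ s.length := by
      rw [hq, hm]
      calc (u + 1 + 1) * f = f * (u + 2) := by ring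
        _ ≤ f * q := Nat.mul_le_mul_left f huq
    have hblk := h m (by omega) hm2
    have hpt := congrArg (fun l => l[t]?) hblk
    simp only [List.getElem?_take, if_pos hmod, List.getElem?_drop] at hpt
    have e1 : (m - 1) * f + t = i := by
      rw [hm, Nat.add_sub_cancel, Nat.mul_comm]
      exact hdm
    have e2 : m * f + t = i + f := by
      rw [hm, Nat.succ_mul, Nat.mul_comm]
      omega
    rwa [e1, e2] at hpt
  · intro h m hm1 hm2
    apply List.ext_getElem?
    intro t
    rw [List.getElem?_take, List.getElem?_take]
    by_cases ht : t < f
    · rw [if_pos ht, if_pos ht, List.getElem?_drop, List.getElem?_drop]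
      have e1 : (m - 1) * f + t + f = m * f + t := by
        rw [Nat.sub_one_mul]
        have : f ≤ m * f := Nat.le_mul_of_pos_left f (by omega)
        omega
      have hlt : (m - 1) * f + t + f < s.length := by
        rw [e1]
        have : m * f + f = (m + 1) * f := (Nat.succ_mul m f).symm
        omega
      have := h ((m - 1) * f + t) hlt
      rwa [e1] at this
    · rw [if_neg ht, if_neg ht]

theorem pv_lper_mod (s : List Char) (f : Nat) (hf : 0 < f) (h : pvLPer s f) :
    ∀ i, i < s.length → s[i]? = s[i % f]? := by
  intro i
  induction i using Nat.strong_induction_on with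
  | _ i ih =>
    intro hi
    by_cases hif : i < f
    · rw [Nat.mod_eq_of_lt hif]
    · have hfi : f ≤ i := le_of_not_gt hif
      have h1 : s[i - f]? = s[i]? := by
        have := h (i - f) (by omega)
        rwa [Nat.sub_add_cancel hfi] at this
      rw [← h1, ih (i - f) (by omega) (by omega), Nat.mod_eq_sub_mod hfi]

theorem pv_lper_iff_cper (s : List Char) (f : Nat) (hf : 0 < f) (hd : f ∣ s.length) :
    pvLPer s f ↔ pvCPer s f := by
  constructor
  · intro h i hi
    have hn : 0 < s.length := by omega
    have hmodn : (i + f) % s.length < s.length := Nat.mod_lt _ hn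
    rw [pv_lper_mod s f hf h i hi, pv_lper_mod s f hf h _ hmodn,
      Nat.mod_mod_of_dvd _ hd, Nat.add_mod_right]
  · intro h i hif
    have := h i (by omega)
    rwa [Nat.mod_eq_of_lt hif] at this

theorem pv_cper_congr (s : List Char) (k k' : Nat) (he : k % s.length = k' % s.length)
    (h : pvCPer s k) : pvCPer s k' := by
  intro i hi
  rw [h i hi]
  congr 1
  rw [Nat.add_mod i k, Nat.add_mod i k', he]

theorem pv_cper_add (s : List Char) (a b : Nat) (ha : pvCPer s a) (hb : pvCPer s b) :
    pvCPer s (a + b) := by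
  intro i hi
  have hn : 0 < s.length := by omega
  rw [ha i hi, hb _ (Nat.mod_lt _ hn), Nat.mod_add_mod]
  congr 1
  rw [Nat.add_assoc]

theorem pv_cper_mul (s : List Char) (k : Nat) (h : pvCPer s k) :
    ∀ m, pvCPer s (m * k) := by
  intro m
  induction m with
  | zero =>
    intro i hi
    rw [Nat.zero_mul, Nat.add_zero, Nat.mod_eq_of_lt hi]
  | succ m ih =>
    rw [Nat.succ_mul]
    exact pv_cper_add s (m * k) k ih h

theorem pv_cper_gcd (s : List Char) (k : Nat) (hn : 0 < s.length) (_hk : 0 < k) (h : pvCPer s k) :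
    pvCPer s (Nat.gcd k s.length) := by
  set n := s.length with hnn
  set g := Nat.gcd k n with hg
  set a := Nat.gcdA k n with ha
  set b := Nat.gcdB k n with hb
  have hbez : (g : Int) = (k : Int) * a + (n : Int) * b := Nat.gcd_eq_gcd_ab k n
  have hnz : (n : Int) ≠ 0 := Nat.cast_ne_zero.mpr (by omega)
  set x := ((a % (n : Int)).toNat) with hx
  have hxa : (x : Int) = a % (n : Int) := Int.toNat_of_nonneg (Int.emod_nonneg a hnz)
  have hme : (x * k) ≡ g [MOD n] := by
    rw [← Int.natCast_modEq_iff]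
    push_cast
    calc (x : Int) * k ≡ (a % (n : Int)) * k [ZMOD (n : Int)] := by rw [hxa]
      _ ≡ a * k [ZMOD (n : Int)] := Int.ModEq.mul_right k (Int.emod_emod_of_dvd a dvd_rfl)
      _ ≡ (g : Int) [ZMOD (n : Int)] := by
          rw [Int.modEq_iff_dvd]
          refine ⟨b, ?_⟩
          rw [hbez]; ring
  exact pv_cper_congr s (x * k) g hme (pv_cper_mul s k h x)

theorem pv_rotate_iff_cper (s : List Char) (k : Nat) (hk : k < s.length) :
    s = s.rotate k ↔ pvCPer s k := by
  have hn : 0 < s.length := by omega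
  constructor
  · intro h i hi
    have hi' : i < (s.rotate k).length := by rwa [List.length_rotate]
    have hm : (i + k) % s.length < s.length := Nat.mod_lt _ hn
    calc s[i]? = (s.rotate k)[i]? := by rw [← h]
      _ = some ((s.rotate k)[i]'hi') := List.getElem?_eq_getElem hi'
      _ = some (s[(i + k) % s.length]'hm) := by simp [List.getElem_rotate]
      _ = s[(i + k) % s.length]? := (List.getElem?_eq_getElem hm).symm
  · intro h
    apply List.ext_getElem?
    intro i
    by_cases hi : i < s.length
    · have hi' : i < (s.rotate k).length := by rwa [List.length_rotate]
      have hm : (i + k) % s.length < s.length := Nat.mod_lt _ hn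
      calc s[i]? = s[(i + k) % s.length]? := h i hi
        _ = some (s[(i + k) % s.length]'hm) := List.getElem?_eq_getElem hm
        _ = some ((s.rotate k)[i]'hi') := by simp [List.getElem_rotate]
        _ = (s.rotate k)[i]? := (List.getElem?_eq_getElem hi').symm
    · rw [List.getElem?_eq_none (by omega), List.getElem?_eq_none (by rw [List.length_rotate]; omega)]

theorem pv_alt_iff (s : List Char) (hn : 0 < s.length) :
    PySem.Chars.isIn s (PySem.List.slice (s ++ s) (some 1) (some (-1))) = true ↔
      ∃ k, 0 < k ∧ k < s.length ∧ s = s.rotate k := by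
  set n := s.length with hnn
  have hint : PySem.List.slice (s ++ s) (some 1) (some (-1)) = ((s ++ s).drop 1).take (2 * n - 2) := by
    have hlen : (s ++ s).length = 2 * n := by rw [List.length_append]; omega
    have h1 : PySem.List.clampIdx (s ++ s).length 1 = 1 := by
      rw [hlen]; simp [PySem.List.clampIdx]; omega
    have h2 : PySem.List.clampIdx (s ++ s).length (-1) = 2 * n - 1 := by
      rw [hlen]
      simp only [PySem.List.clampIdx]
      rw [if_pos (by omega : (-1 : Int) < 0), if_neg (by omega : ¬((2 * n : Nat) : Int) + -1 < 0)]
      omega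
    simp only [PySem.List.slice]
    rw [h1, h2]
    have h3 : 2 * n - 1 - 1 = 2 * n - 2 := by omega
    rw [h3]
  rw [← PySem.Chars.exists_prefix_drop_iff_isIn, hint]
  have hrot : ∀ k : Nat, 0 < k → k < n → (((s ++ s).drop k).take n = s.rotate k) := by
    intro k _ hkn
    rw [List.drop_append_of_le_length (by omega), List.take_append,
      List.rotate_eq_drop_append_take (by omega : k ≤ s.length)]
    have hdl : (s.drop k).length = n - k := by rw [List.length_drop]
    rw [List.take_of_length_le (by rw [List.length_drop]; omega), hdl,
      Nat.sub_sub_self (Nat.le_of_lt hkn)]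
  constructor
  · rintro ⟨j, hp⟩
    rw [List.drop_take, List.drop_drop] at hp
    obtain ⟨hpre, hlen⟩ := List.prefix_take_iff.mp hp
    have hj : j + 2 ≤ n := by
      rw [← hnn] at hlen
      omega
    refine ⟨j + 1, by omega, by omega, ?_⟩
    have hst := List.prefix_iff_eq_take.mp hpre
    rw [Nat.add_comm 1 j] at hst
    rw [← hrot (j + 1) (by omega) (by omega)]
    rw [← hnn] at hst
    exact hst
  · rintro ⟨k, hk0, hkn, hr⟩
    refine ⟨k - 1, ?_⟩
    rw [List.drop_take, List.drop_drop]
    have he : 1 + (k - 1) = k := by omega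
    rw [he]
    rw [List.prefix_take_iff]
    constructor
    · rw [List.prefix_iff_eq_take, ← hnn, hrot k hk0 hkn]
      exact hr
    · rw [← hnn]; omega

theorem pv_A_iff (num : Int) :
    is_invalid num = true ↔
      ∃ f : Nat, 0 < f ∧ f < (PySem.Int.toChars num).length ∧ f ∣ (PySem.Int.toChars num).length ∧
        pvLPer (PySem.Int.toChars num) f := by
  set s := PySem.Int.toChars num with hs
  have hn : 0 < s.length := List.length_pos_iff.mpr (pv_toChars_ne_nil num)
  show (match PySem.List.remove? (find_factors (s.length : Int)) (s.length : Int) with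
    | none => false
    | some factors =>
      factors.any (fun factor =>
        pvScan s (s.length : Int) factor (s.length + 1) factor (factor + factor) == (s.length : Int))) = true ↔ _
  rw [pv_remove_factors s.length hn]
  simp only [List.any_eq_true]
  constructor
  · rintro ⟨x, hx, hpx⟩
    obtain ⟨f, rfl, hf0, hfn, hfd⟩ := (pv_mem_erased s.length x).mp hx
    refine ⟨f, hf0, hfn, hfd, ?_⟩
    have hscan : pvScan s (s.length : Int) (f : Int) (s.length + 1) ((1 * f : Nat) : Int) (((1 + 1) * f : Nat) : Int) = (s.length : Int) := by
      have e1 : ((1 * f : Nat) : Int) = (f : Int) := by norm_num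
      have e2 : (((1 + 1) * f : Nat) : Int) = (f : Int) + (f : Int) := by push_cast; ring
      rw [e1, e2]
      exact eq_of_beq hpx
    have hle : 1 * f ≤ s.length := by
      rw [Nat.one_mul]; exact Nat.le_of_dvd hn hfd
    have hfuel : s.length < (s.length + 1 + 1) * f := by
      calc s.length < s.length + 2 := by omega
        _ = (s.length + 1 + 1) * 1 := by ring
        _ ≤ (s.length + 1 + 1) * f := Nat.mul_le_mul_left _ hf0
    exact (pv_blocks_iff_lper s f hf0 hfd).mp
      ((pv_scan_spec s f hf0 hfd (s.length + 1) 1 one_pos hle hfuel).mp hscan)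
  · rintro ⟨f, hf0, hfn, hfd, hl⟩
    refine ⟨(f : Int), (pv_mem_erased s.length (f : Int)).mpr ⟨f, rfl, hf0, hfn, hfd⟩, ?_⟩
    have hle : 1 * f ≤ s.length := by
      rw [Nat.one_mul]; exact Nat.le_of_dvd hn hfd
    have hfuel : s.length < (s.length + 1 + 1) * f := by
      calc s.length < s.length + 2 := by omega
        _ = (s.length + 1 + 1) * 1 := by ring
        _ ≤ (s.length + 1 + 1) * f := Nat.mul_le_mul_left _ hf0
    have hscan := (pv_scan_spec s f hf0 hfd (s.length + 1) 1 one_pos hle hfuel).mpr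
      ((pv_blocks_iff_lper s f hf0 hfd).mpr hl)
    have e1 : ((1 * f : Nat) : Int) = (f : Int) := by norm_num
    have e2 : (((1 + 1) * f : Nat) : Int) = (f : Int) + (f : Int) := by push_cast; ring
    rw [e1, e2] at hscan
    exact beq_iff_eq.mpr hscan

theorem pv_main (num : Int) : is_invalid num = is_invalid_alt num := by
  set s := PySem.Int.toChars num with hs
  have hn : 0 < s.length := List.length_pos_iff.mpr (pv_toChars_ne_nil num)
  rw [Bool.eq_iff_iff, pv_A_iff num]
  show _ ↔ PySem.Chars.isIn s (PySem.List.slice (s ++ s) (some 1) (some (-1))) = true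
  rw [pv_alt_iff s hn]
  constructor
  · rintro ⟨f, hf0, hfn, hfd, hl⟩
    exact ⟨f, hf0, hfn, (pv_rotate_iff_cper s f hfn).mpr
      ((pv_lper_iff_cper s f hf0 hfd).mp hl)⟩
  · rintro ⟨k, hk0, hkn, hr⟩
    have hc : pvCPer s k := (pv_rotate_iff_cper s k hkn).mp hr
    have hg := pv_cper_gcd s k hn hk0 hc
    refine ⟨Nat.gcd k s.length, Nat.gcd_pos_of_pos_left _ hk0, ?_, Nat.gcd_dvd_right _ _, ?_⟩
    · exact lt_of_le_of_lt (Nat.gcd_le_left _ hk0) hkn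
    · exact (pv_lper_iff_cper s _ (Nat.gcd_pos_of_pos_left _ hk0) (Nat.gcd_dvd_right _ _)).mpr hg

-- ===== VERDICT (by name: the statement is the Claim_ definition above) =====
theorem is_invalid_spec : Claim_equal_is_invalid := by
  intro num _
  unfold Spec_is_invalid
  exact pv_main num
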